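-- pv_equiv track=rewrite | github.com/shengminp/SELF-EdiT | fairseq_mo/utils/tokenizer.py | rearrange_ring_number
-- ===== SOURCE A (Python) =====
-- MAX_RING_COUNTS = 20
--
-- def find_all_not_used_rids(smiles):
--     ## create a generator
--     chars_iter = (c for c in smiles)
--
--     ## init output
--     rids_not_used = [f'{i}' for i in range(1,10)] + [f'%{i}' for i in range(10,MAX_RING_COUNTS)]
--
--     ## get an initial character
--     c = next(chars_iter, None)
--
--     ## search all not used numbers
--     while c is not None:
--         ## exception of %
--         if c == '%':
--             c += next(chars_iter) + next(chars_iter)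
--         ## Case1: ion symbols
--         if c == '[':
--             while c != ']':
--                 c = next(chars_iter)
--             assert c == ']'
--         ## Case2: ring
--         elif c in rids_not_used:
--             _ = rids_not_used.pop(rids_not_used.index(c))
--         ## next character
--         c = next(chars_iter, None)
--
--     return rids_not_used
--
-- def rearrange_ring_number(smiles):
--     ## create a generator
--     chars_iter = (c for c in smiles)
--
--     ## init output
--     chars = []
--
--     ## init
--     mapping = {}
--     rids = [f'{i}' for i in range(1,10)] + [f'%{i}' for i in range(10,MAX_RING_COUNTS)]
--     rid2stat = {idx:0 for idx in rids} # 0: not_used, 1: open, 2: closed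
--
--     ## search all not used numbers
--     rids_not_used = find_all_not_used_rids(smiles)
--
--     ## get an initial character
--     c = next(chars_iter, None)
--
--     ## do arrangement
--     while c is not None:
--         ## exception of %
--         if c == '%':
--             c += next(chars_iter) + next(chars_iter)
--         ## Case1: ion symbols
--         if c == '[':
--             while c != ']':
--                 chars.append(c)
--                 c = next(chars_iter)
--             assert c == ']'
--             chars.append(c)
--         ## Case2: other symbols
--         else:
--             status = rid2stat.get(c, -1)
--             ## ring open
--             if status == 0:
--                 rid2stat[c] = 1
--             ## ring close
--             elif status == 1:
--                 rid2stat[c] = 2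
--             ## ring id rearrangement
--             elif status == 2:
--                 ## close
--                 if c in mapping:
--                     c_new = mapping.pop(c)
--                     assert rid2stat[c_new] == 1
--                     rid2stat[c_new] = 2
--                 ## open
--                 else:
--                     c_new = rids_not_used.pop(0)
--                     mapping[c] = c_new
--                     assert rid2stat[c_new] == 0
--                     rid2stat[c_new] = 1
--                 c = c_new
--             chars.append(c)
--         ## next character
--         c = next(chars_iter, None)
--
--     ## error check
--     assert len(mapping) == 0
--
--     return ''.join(chars)
-- ===== SOURCE B (Python) =====
-- MAX_RING_COUNTS = 20
--
-- def _tokenize(smiles):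
--     ## one pass: group '[...]' and '%NN' into single tokens (next() raises
--     ## StopIteration on a trailing '%' or an unclosed '[' just like A's walks)
--     chars_iter = iter(smiles)
--     tokens = []
--     for c in chars_iter:
--         if c == '%':
--             c += next(chars_iter) + next(chars_iter)
--         elif c == '[':
--             while not c.endswith(']'):
--                 c += next(chars_iter)
--         tokens.append(c)
--     return tokens
--
-- def rearrange_ring_number(smiles):
--     tokens = _tokenize(smiles)
--     rids = [f'{i}' for i in range(1, 10)] + [f'%{i}' for i in range(10, MAX_RING_COUNTS)]
--     rid_set = set(rids)
--     ## count pass: occurrence index of every ring-id token, left to right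
--     seen = {}
--     occ = []
--     for t in tokens:
--         if t in rid_set:
--             k = seen.get(t, 0)
--             seen[t] = k + 1
--             occ.append(k)
--         else:
--             occ.append(None)
--     ## every ring id reused beyond its first open/close pair must close its last pair
--     for n in seen.values():
--         assert n < 3 or n % 2 == 0
--     ## rewrite each token purely by its occurrence index: the first two keep the id,
--     ## every later even occurrence opens with the next unused id, an odd one closes it
--     pool = [r for r in rids if r not in seen]
--     assigned = {}
--     out = []
--     for t, k in zip(tokens, occ):
--         if k is None or k < 2:
--             out.append(t)
--         elif k % 2 == 0:
--             fresh = pool.pop(0)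
--             assigned[t] = fresh
--             out.append(fresh)
--         else:
--             out.append(assigned.pop(t))
--     return ''.join(out)
-- ===== Notes on version B (the rewrite author's own statement) =====
-- stated objective: alternative
-- what changed: B drops A's streaming 0/1/2 rid2stat state machine entirely: it tokenizes once, counts each ring id's occurrences to give every token its occurrence index, validates reuse parity up front, and then rewrites each token purely from that index (first two occurrences keep the id, each later even occurrence takes the next unused id from a precomputed pool, each odd one reuses its partner's), instead of A's two generator walks updating status dicts per character.
import Mathlib
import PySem

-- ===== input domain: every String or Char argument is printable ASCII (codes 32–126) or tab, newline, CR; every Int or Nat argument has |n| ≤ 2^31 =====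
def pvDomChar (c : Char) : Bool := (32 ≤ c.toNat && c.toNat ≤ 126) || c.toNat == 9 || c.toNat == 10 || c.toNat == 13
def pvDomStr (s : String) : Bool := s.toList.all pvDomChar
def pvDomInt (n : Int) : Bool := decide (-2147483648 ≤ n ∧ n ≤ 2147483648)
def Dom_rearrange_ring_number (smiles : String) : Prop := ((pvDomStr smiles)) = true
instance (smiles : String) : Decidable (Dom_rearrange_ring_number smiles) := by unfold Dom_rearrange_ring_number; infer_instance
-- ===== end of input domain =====

-- B replaces A's streaming 0/1/2 per-id state machine by a plan computed from occurrence
-- counts: tokenize once, give every ring-id token its occurrence index, validate reuse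
-- parity up front, then rewrite each token purely from that index; objective: alternative.

-- ===== PORT A =====

-- rids = [f'{i}' for i in range(1,10)] + [f'%{i}' for i in range(10,MAX_RING_COUNTS)]  (module constant, shared by both programs)
def pvRids : List String :=
  (PySem.List.pyRange 1 10 1).map (fun i => String.ofList (PySem.Int.toChars i)) ++
  (PySem.List.pyRange 10 20 1).map (fun i => String.ofList ('%' :: PySem.Int.toChars i))

-- rid2stat = {idx: 0 for idx in rids}
def pvInitStat : PySem.Dict String Int := PySem.Dict.ofList (pvRids.map (fun r => (r, (0 : Int))))

-- find_all_not_used_rids, inner 'while c != \']\': c = next(chars_iter)' (none = StopIteration)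
def pvSkipBr : List Char → Option (List Char)
  | [] => none
  | c :: rest => if c = ']' then some rest else pvSkipBr rest

-- rids_not_used.pop(rids_not_used.index(c))
def pvPopRid (pool : List String) (c : String) : Option (List String) :=
  match PySem.List.index? pool c with
  | some i =>
    match PySem.List.pop? pool (i : Int) with
    | some (_, pool') => some pool'
    | none => none
  | none => none

theorem pvSkipBr_length : ∀ (cs r : List Char), pvSkipBr cs = some r → r.length < cs.length := by
  intro cs
  induction cs with
  | nil => intro r h; simp [pvSkipBr] at h
  | cons c rest ih =>
    intro r h
    by_cases hc : c = ']'
    · simp [pvSkipBr, hc] at h; subst h; simp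
    · simp [pvSkipBr, hc] at h
      exact Nat.lt_trans (ih r h) (by simp)

-- the while-loop of find_all_not_used_rids (none = an exception escaped it)
def pvFindLoop (cs : List Char) (pool : List String) : Option (List String) :=
  match cs with
  | [] => some pool
  | c0 :: rest0 =>
    if c0 = '%' then
      match rest0 with
      | c1 :: c2 :: r =>
        -- c = '%' + next + next; a 3-char c is never '[' so control falls to the elif
        let c := String.ofList [c0, c1, c2]
        if pool.contains c then
          match pvPopRid pool c with
          | some pool' => pvFindLoop r pool'
          | none => none
        else pvFindLoop r pool
      | _ => none  -- StopIteration
    else if c0 = '[' then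
      -- while c != ']': c = next(chars_iter)   (c starts as '[', never ']')
      match h : pvSkipBr rest0 with
      | some rest' => pvFindLoop rest' pool
      | none => none  -- StopIteration
    else
      let c := String.ofList [c0]
      if pool.contains c then
        match pvPopRid pool c with
        | some pool' => pvFindLoop rest0 pool'
        | none => none
      else pvFindLoop rest0 pool
termination_by cs.length
decreasing_by
  · simp; omega
  · simp; omega
  · exact Nat.lt_trans (pvSkipBr_length _ _ h) (by simp)
  · simp
  · simp

-- the inner '[' loop of the main walk: appends every char through the closing ']'
def pvBrAcc : List Char → List String → Option (List String × List Char)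
  | [], _ => none  -- StopIteration
  | c :: rest, chars =>
    if c = ']' then some (chars ++ [String.ofList [c]], rest)
    else pvBrAcc rest (chars ++ [String.ofList [c]])

theorem pvBrAcc_length : ∀ (cs : List Char) (acc out : List String) (r : List Char),
    pvBrAcc cs acc = some (out, r) → r.length < cs.length := by
  intro cs
  induction cs with
  | nil => intro acc out r h; simp [pvBrAcc] at h
  | cons c rest ih =>
    intro acc out r h
    by_cases hc : c = ']'
    · simp [pvBrAcc, hc] at h; simp [← h.2]
    · simp [pvBrAcc, hc] at h
      exact Nat.lt_trans (ih _ _ _ h) (by simp)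

-- the Case2 ('other symbols') block of the main while-loop, for the current token c
def pvRingStep (c : String) (chars : List String) (mapping : PySem.Dict String String)
    (rid2stat : PySem.Dict String Int) (pool : List String) :
    Option (List String × PySem.Dict String String × PySem.Dict String Int × List String) :=
  let status := rid2stat.getD c (-1)
  if status = 0 then some (chars ++ [c], mapping, rid2stat.insert c 1, pool)
  else if status = 1 then some (chars ++ [c], mapping, rid2stat.insert c 2, pool)
  else if status = 2 then
    if mapping.contains c then
      match mapping.pop? c with
      | some (cNew, mapping') =>
        match rid2stat.get? cNew with
        | some v =>
          if v = 1 then some (chars ++ [cNew], mapping', rid2stat.insert cNew 2, pool)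
          else none  -- assert rid2stat[c_new] == 1
        | none => none  -- KeyError
      | none => none
    else
      match PySem.List.pop? pool 0 with
      | some (cNew, pool') =>
        match rid2stat.get? cNew with
        | some v =>
          if v = 0 then some (chars ++ [cNew], mapping.insert c cNew, rid2stat.insert cNew 1, pool')
          else none  -- assert rid2stat[c_new] == 0
        | none => none  -- KeyError
      | none => none  -- IndexError: pop from empty list
  else some (chars ++ [c], mapping, rid2stat, pool)

-- the main while-loop of rearrange_ring_number
def pvMainLoop (cs : List Char) (chars : List String) (mapping : PySem.Dict String String)
    (rid2stat : PySem.Dict String Int) (pool : List String) :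
    Option (List String × PySem.Dict String String × PySem.Dict String Int × List String) :=
  match cs with
  | [] => some (chars, mapping, rid2stat, pool)
  | c0 :: rest0 =>
    if c0 = '%' then
      match rest0 with
      | c1 :: c2 :: r =>
        -- c = '%' + next + next; never '[' so control falls to the else block
        match pvRingStep (String.ofList [c0, c1, c2]) chars mapping rid2stat pool with
        | some (chars', mapping', stat', pool') => pvMainLoop r chars' mapping' stat' pool'
        | none => none
      | _ => none  -- StopIteration
    else if c0 = '[' then
      match h : pvBrAcc (c0 :: rest0) chars with
      | some (chars', rest') => pvMainLoop rest' chars' mapping rid2stat pool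
      | none => none  -- StopIteration
    else
      match pvRingStep (String.ofList [c0]) chars mapping rid2stat pool with
      | some (chars', mapping', stat', pool') => pvMainLoop rest0 chars' mapping' stat' pool'
      | none => none
termination_by cs.length
decreasing_by
  · simp; omega
  · exact pvBrAcc_length _ _ _ _ h
  · simp

def rearrange_ring_number (smiles : String) : String :=
  match pvFindLoop smiles.toList pvRids with
  | none => ""  -- exception inside find_all_not_used_rids (outside Pre_)
  | some rids_not_used =>
    match pvMainLoop smiles.toList [] PySem.Dict.empty pvInitStat rids_not_used with
    | none => ""  -- exception inside the main loop (outside Pre_)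
    | some (chars, mapping, _, _) =>
      if PySem.Dict.size mapping = 0 then PySem.Str.join "" chars
      else ""  -- assert len(mapping) == 0 (outside Pre_)

-- ===== PORT B =====

-- the inner '[' loop of _tokenize: 'while not c.endswith("]"): c += next(chars_iter)'
def pvGrabBr (t : List Char) (cs : List Char) : Option (List Char × List Char) :=
  if PySem.Chars.endswith t [']'] then some (t, cs)
  else
    match cs with
    | [] => none  -- StopIteration
    | c :: rest => pvGrabBr (t ++ [c]) rest
termination_by cs.length

theorem pvGrabBr_length : ∀ (cs t tok r : List Char), pvGrabBr t cs = some (tok, r) → r.length ≤ cs.length := by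
  intro cs
  induction cs with
  | nil => intro t tok r h; rw [pvGrabBr] at h; split at h <;> simp_all
  | cons c rest ih =>
    intro t tok r h
    rw [pvGrabBr] at h
    split at h
    · simp at h; simp [← h.2]
    · exact Nat.le_trans (ih _ _ _ h) (by simp)

-- _tokenize: one pass grouping '[...]' and '%NN' into single tokens
def pvTokenize (cs : List Char) : Option (List String) :=
  match cs with
  | [] => some []
  | c0 :: rest0 =>
    if c0 = '%' then
      match rest0 with
      | c1 :: c2 :: r =>
        match pvTokenize r with
        | some ts => some (String.ofList [c0, c1, c2] :: ts)
        | none => none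
      | _ => none  -- StopIteration
    else if c0 = '[' then
      match h : pvGrabBr [c0] rest0 with
      | some (tok, rest') =>
        match pvTokenize rest' with
        | some ts => some (String.ofList tok :: ts)
        | none => none
      | none => none  -- StopIteration
    else
      match pvTokenize rest0 with
      | some ts => some (String.ofList [c0] :: ts)
      | none => none
termination_by cs.length
decreasing_by
  · simp; omega
  · exact Nat.lt_of_le_of_lt (pvGrabBr_length _ _ _ _ h) (by simp)
  · simp

-- rid_set = set(rids)
def pvRidSet : PySem.Set String := PySem.Set.ofList pvRids

-- body of B's counting loop: 'k = seen.get(t, 0); seen[t] = k + 1; occ.append(k)'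
def pvCountStep (st : PySem.Dict String Int × List (Option Int)) (t : String) :
    PySem.Dict String Int × List (Option Int) :=
  if PySem.Set.contains pvRidSet t then
    (st.1.insert t (st.1.getD t 0 + 1), st.2 ++ [some (st.1.getD t 0)])
  else (st.1, st.2 ++ [none])

-- body of B's rewrite loop over 'zip(tokens, occ)'
def pvPlanStep (st : List String × List String × PySem.Dict String String)
    (tk : String × Option Int) :
    Option (List String × List String × PySem.Dict String String) :=
  match tk.2 with
  | none => some (st.1 ++ [tk.1], st.2.1, st.2.2)
  | some k =>
    if k < 2 then some (st.1 ++ [tk.1], st.2.1, st.2.2)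
    else if PySem.Int.mod k 2 = 0 then
      match PySem.List.pop? st.2.1 (0 : Int) with
      | some (fresh, pool') => some (st.1 ++ [fresh], pool', st.2.2.insert tk.1 fresh)
      | none => none  -- IndexError: pop from empty list
    else
      match st.2.2.pop? tk.1 with
      | some (fresh, assigned') => some (st.1 ++ [fresh], st.2.1, assigned')
      | none => none  -- KeyError

def rearrange_ring_number_alt (smiles : String) : String :=
  match pvTokenize smiles.toList with
  | none => ""  -- StopIteration in _tokenize (outside Pre_)
  | some tokens =>
    let counted := tokens.foldl pvCountStep (PySem.Dict.empty, [])
    if counted.1.values.all (fun n => decide (n < 3) || decide (PySem.Int.mod n 2 = 0)) then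
      match List.foldlM pvPlanStep
          ([], pvRids.filter (fun r => !(counted.1.contains r)), PySem.Dict.empty)
          (tokens.zip counted.2) with
      | none => ""  -- IndexError/KeyError in the rewrite loop (outside Pre_)
      | some st => PySem.Str.join "" st.1
    else ""  -- AssertionError (outside Pre_)

-- ===== PRECONDITION & SPEC =====

-- Pre_ excludes exactly the inputs on which the Python A raises: strings that do not
-- tokenize (a '%' with fewer than two following characters, an unclosed '[' -- StopIteration),
-- strings where some ring id occurs an odd number >= 3 of times (final AssertionError),
-- and strings needing more replacement ids than remain unused (IndexError from pop(0)).
-- Both Pythons raise together there; both ports return "" there, so the spec holds anyway.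
-- pvPreToks is Pre_'s own one-fold description of the string's token shape
-- ('[...]' groups, '%NN' groups, single characters); it is kernel-reducible and is
-- not used by either port.
inductive PvScanMode : Type
  | norm : PvScanMode
  | brk : List Char → PvScanMode
  | pct : Option Char → PvScanMode
deriving DecidableEq, Repr

def pvScanStep (st : PvScanMode × List String) (c : Char) : PvScanMode × List String :=
  match st with
  | (.pct none, acc) => (.pct (some c), acc)
  | (.pct (some c1), acc) => (.norm, String.ofList ['%', c1, c] :: acc)
  | (.brk buf, acc) =>
      if c = ']' then (.norm, String.ofList ('[' :: buf.reverse ++ [']']) :: acc)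
      else (.brk (c :: buf), acc)
  | (.norm, acc) =>
      if c = '%' then (.pct none, acc)
      else if c = '[' then (.brk [], acc)
      else (.norm, String.ofList [c] :: acc)

def pvPreToks (cs : List Char) : Option (List String) :=
  match cs.foldl pvScanStep (.norm, []) with
  | (.norm, acc) => some acc.reverse
  | _ => none  -- a trailing '%NN' cut short or an unclosed '['

def pvPreB (smiles : String) : Bool :=
  match pvPreToks smiles.toList with
  | none => false
  | some ts =>
    (pvRids.all fun r => !(decide (ts.count r % 2 = 1) && decide (3 ≤ ts.count r))) &&
    decide ((pvRids.map fun r => (ts.count r - 1) / 2).sum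
              ≤ (pvRids.filter fun r => !(ts.contains r)).length)

def Pre_rearrange_ring_number (smiles : String) : Prop := pvPreB smiles = true
instance (smiles : String) : Decidable (Pre_rearrange_ring_number smiles) := by
  unfold Pre_rearrange_ring_number; infer_instance

def pvWitness_rearrange_ring_number : String := "C1CC1C2CCC2"

def Spec_rearrange_ring_number (smiles : String) (out : String) : Prop := out = rearrange_ring_number_alt smiles
instance (smiles : String) (out : String) : Decidable (Spec_rearrange_ring_number smiles out) := by unfold Spec_rearrange_ring_number; infer_instance

-- ===== CLAIM (what is proved, stated in full; the proofs are below) =====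
def Claim_equal_rearrange_ring_number : Prop := ∀ (smiles : String), Dom_rearrange_ring_number smiles → Pre_rearrange_ring_number smiles → Spec_rearrange_ring_number smiles (rearrange_ring_number smiles)

-- ===== LEMMAS AND PROOFS =====

-- A's main loop, reshaped to one step per TOKEN (proof-only device; the A = foldl bridge
-- is pvMainCorr below, the foldl = plan bridge is pvSim below)
def pvStepTok (st : List String × PySem.Dict String String × PySem.Dict String Int × List String)
    (t : String) :
    Option (List String × PySem.Dict String String × PySem.Dict String Int × List String) :=
  let (out, mapping, rid2stat, pool) := st
  if PySem.Str.startswith t "[" then some (out ++ [t], mapping, rid2stat, pool)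
  else
    let status := rid2stat.getD t (-1)
    if status = 0 then some (out ++ [t], mapping, rid2stat.insert t 1, pool)
    else if status = 1 then some (out ++ [t], mapping, rid2stat.insert t 2, pool)
    else if status = 2 then
      if mapping.contains t then
        match mapping.pop? t with
        | some (tNew, mapping') =>
          match rid2stat.get? tNew with
          | some v =>
            if v = 1 then some (out ++ [tNew], mapping', rid2stat.insert tNew 2, pool)
            else none
          | none => none
        | none => none
      else
        match PySem.List.pop? pool 0 with
        | some (tNew, pool') =>
          match rid2stat.get? tNew with
          | some v =>
            if v = 0 then some (out ++ [tNew], mapping.insert t tNew, rid2stat.insert tNew 1, pool')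
            else none
          | none => none
        | none => none
    else some (out ++ [t], mapping, rid2stat, pool)

-- A's whole computation on a token list
def pvMachine (ts : List String) : String :=
  match List.foldlM pvStepTok ([], PySem.Dict.empty, pvInitStat, pvRids.filter (fun r => !(ts.contains r))) ts with
  | none => ""
  | some st => if PySem.Dict.size st.2.1 = 0 then PySem.Str.join "" st.1 else ""

-- B's whole computation on a token list
def pvPlan (ts : List String) : String :=
  let counted := ts.foldl pvCountStep (PySem.Dict.empty, [])
  if counted.1.values.all (fun n => decide (n < 3) || decide (PySem.Int.mod n 2 = 0)) then
    match List.foldlM pvPlanStep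
        ([], pvRids.filter (fun r => !(counted.1.contains r)), PySem.Dict.empty)
        (ts.zip counted.2) with
    | none => ""
    | some st => PySem.Str.join "" st.1
  else ""

-- expansion of one token into the strings A appends for it (proof-only device)
def pvExpand (t : String) : List String :=
  if PySem.Str.startswith t "[" then t.toList.map (fun c => String.ofList [c]) else [t]

theorem pvJoinNil (xss : List (List Char)) : PySem.Chars.join [] xss = xss.flatten := by
  simp only [PySem.Chars.join, List.intercalate]
  induction xss with
  | nil => rfl
  | cons x xs ih => cases xs <;> simp_all [List.intersperse]

theorem pvExpandFlatten (t : String) : ((pvExpand t).map String.toList).flatten = t.toList := by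
  unfold pvExpand
  split
  · simp only [List.map_map]
    induction t.toList with
    | nil => rfl
    | cons c cs ih => simp_all [Function.comp]
  · simp

theorem pvJoinExpand (o : List String) : PySem.Str.join "" (o.flatMap pvExpand) = PySem.Str.join "" o := by
  simp only [PySem.Str.join]
  have h0 : ("" : String).toList = [] := rfl
  rw [h0, pvJoinNil, pvJoinNil]
  congr 1
  induction o with
  | nil => rfl
  | cons t ts ih =>
    simp only [List.flatMap_cons, List.map_append, List.flatten_append, ih, List.map_cons, List.flatten_cons]
    rw [pvExpandFlatten]

theorem pvSuffixSnoc (t : List Char) (c : Char) : ([']'] <:+ t ++ [c]) ↔ c = ']' := by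
  constructor
  · rintro ⟨pre, hpre⟩
    have := congrArg List.getLast? hpre
    simp at this
    exact this.symm
  · rintro rfl; exact ⟨t, rfl⟩

theorem pvEndsSnoc (t : List Char) (c : Char) : PySem.Chars.endswith (t ++ [c]) [']'] = (c == ']') := by
  by_cases hc : c = ']'
  · subst hc; simp only [beq_self_eq_true]; exact (PySem.Chars.endswith_iff _ _).mpr ⟨t, rfl⟩
  · have h1 : (c == ']') = false := beq_eq_false_iff_ne.mpr hc
    rw [h1]
    apply Bool.eq_false_iff.mpr
    intro h
    exact hc ((pvSuffixSnoc t c).mp ((PySem.Chars.endswith_iff _ _).mp h))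

-- remainder agreement between B's bracket grab and A's find-side bracket skip

theorem pvSkipGrab : ∀ (cs t : List Char), PySem.Chars.endswith t [']'] = false →
    (pvGrabBr t cs).map (·.2) = pvSkipBr cs := by
  intro cs
  induction cs with
  | nil => intro t ht; rw [pvGrabBr, ht]; simp [pvSkipBr]
  | cons c rest ih =>
    intro t ht
    rw [pvGrabBr, ht]
    simp only [Bool.false_eq_true, if_false]
    by_cases hc : c = ']'
    · subst hc
      rw [pvGrabBr.eq_def, pvEndsSnoc]
      simp [pvSkipBr]
    · rw [ih (t ++ [c]) (by rw [pvEndsSnoc]; exact beq_eq_false_iff_ne.mpr hc)]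
      simp [pvSkipBr, hc]

theorem pvGrabPrefix : ∀ (cs t tok r : List Char), pvGrabBr t cs = some (tok, r) → t <+: tok := by
  intro cs
  induction cs with
  | nil => intro t tok r h; rw [pvGrabBr] at h; split at h <;> simp_all
  | cons c rest ih =>
    intro t tok r h
    rw [pvGrabBr] at h
    split at h
    · simp at h; simp [h.1]
    · exact List.IsPrefix.trans (List.prefix_append t [c]) (ih _ _ _ h)

-- A's bracket-appending loop produces exactly B's bracket token, char by char

theorem pvBrCorr : ∀ (cs t : List Char) (o : List String), PySem.Chars.endswith t [']'] = false →
    pvBrAcc cs (o ++ t.map (fun c => String.ofList [c]))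
      = (pvGrabBr t cs).map (fun tr => (o ++ tr.1.map (fun c => String.ofList [c]), tr.2)) := by
  intro cs
  induction cs with
  | nil => intro t o ht; rw [pvGrabBr, ht]; simp [pvBrAcc]
  | cons c rest ih =>
    intro t o ht
    rw [pvGrabBr, ht]
    simp only [Bool.false_eq_true, if_false]
    simp only [pvBrAcc]
    by_cases hc : c = ']'
    · subst hc
      rw [pvGrabBr.eq_def, pvEndsSnoc]
      simp
    · have h2 : PySem.Chars.endswith (t ++ [c]) [']'] = false := by
        rw [pvEndsSnoc]; exact beq_eq_false_iff_ne.mpr hc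
      have h3 := ih (t ++ [c]) o h2
      simp only [List.map_append, List.map_cons, List.map_nil, ← List.append_assoc] at h3 ⊢
      rw [if_neg hc]
      exact h3

theorem pvPopRidIsSome (p : List String) (c : String) (hc : c ∈ p) :
    ∃ p', pvPopRid p c = some p' := by
  unfold pvPopRid
  have h1 : ∃ i, PySem.List.index? p c = some i := by
    have := (PySem.List.index?_isSome_iff p c).mpr hc
    exact Option.isSome_iff_exists.mp this
  obtain ⟨i, hi⟩ := h1
  rw [hi]
  try dsimp only
  have hlt : i < p.length := by
    rw [PySem.List.index?_eq_some_iff] at hi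
    obtain ⟨pre, suf, rfl, rfl, -⟩ := hi
    simp
  rw [PySem.List.pop?_natCast p i hlt]
  exact ⟨_, rfl⟩

theorem pvIndexOfMem (p : List String) (c : String) (hnd : p.Nodup) (hc : c ∈ p) :
    PySem.List.index? p c = some (List.idxOf c p) := by
  rw [PySem.List.index?_eq_idxOf?]
  rw [List.idxOf?_eq_some_iff]
  refine ⟨List.idxOf_lt_length_of_mem hc, List.getElem_idxOf _, ?_⟩
  intro j hj hja
  have hjlen : j < p.length := lt_trans hj (List.idxOf_lt_length_of_mem hc)
  have h2 := hnd.idxOf_getElem j hjlen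
  rw [hja] at h2
  omega

theorem pvPopRidOfMem (p : List String) (c : String) (hnd : p.Nodup) (hc : c ∈ p) :
    pvPopRid p c = some (p.erase c) := by
  unfold pvPopRid
  rw [pvIndexOfMem p c hnd hc]
  try dsimp only
  rw [PySem.List.pop?_natCast p _ (List.idxOf_lt_length_of_mem hc)]
  rw [← List.erase_eq_eraseIdx_of_idxOf rfl]

-- token/bracket-shape string facts
theorem pvSwCons (c : Char) (l : List Char) (hc : c ≠ '[') :
    PySem.Str.startswith (String.ofList (c :: l)) "[" = false := by
  apply Bool.eq_false_iff.mpr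
  intro h
  simp only [PySem.Str.startswith, String.toList_ofList] at h
  have h2 := (PySem.Chars.startswith_iff _ _).mp h
  have : ("[" : String).toList = ['['] := rfl
  rw [this] at h2
  rw [List.cons_prefix_cons] at h2
  exact hc h2.1.symm

theorem pvSwBracket (l : List Char) :
    PySem.Str.startswith (String.ofList ('[' :: l)) "[" = true := by
  simp only [PySem.Str.startswith, String.toList_ofList]
  exact (PySem.Chars.startswith_iff _ _).mpr ⟨l, rfl⟩

theorem pvExpandSingle (t : String) (ht : PySem.Str.startswith t "[" = false) :
    pvExpand t = [t] := by
  unfold pvExpand; rw [ht]; simp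

theorem pvExpandBracket (l : List Char) :
    pvExpand (String.ofList ('[' :: l)) = ('[' :: l).map (fun c => String.ofList [c]) := by
  unfold pvExpand; rw [pvSwBracket]; simp

-- the filter step matching one pop (or skip) of find_all_not_used_rids
theorem pvFilterStep (p : List String) (tok : String) (ts' : List String) (hnd : p.Nodup) :
    (if p.contains tok then p.erase tok else p).filter (fun r => !(ts'.contains r))
      = p.filter (fun r => !((tok :: ts').contains r)) := by
  by_cases hm : p.contains tok
  · rw [if_pos hm, hnd.erase_eq_filter, List.filter_filter]
    apply List.filter_congr
    intro x _
    simp [Bool.not_or, Bool.and_comm, bne, BEq.beq]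
  · rw [if_neg hm]
    apply List.filter_congr
    intro x hx
    have hxe : x ≠ tok := by
      intro rfl_eq; subst rfl_eq
      exact hm (List.elem_eq_true_of_mem hx)
    simp [Bool.not_or]
    intro _; exact hxe

theorem pvTokNoneFind : ∀ (n : Nat) (cs : List Char), cs.length ≤ n → ∀ (p : List String),
    pvTokenize cs = none → pvFindLoop cs p = none := by
  intro n
  induction n with
  | zero =>
    intro cs hlen p htok
    cases cs with
    | nil => rw [pvTokenize.eq_def] at htok; simp at htok
    | cons a b => simp at hlen
  | succ n ih =>
    intro cs hlen p htok
    cases cs with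
    | nil => rw [pvTokenize.eq_def] at htok; simp at htok
    | cons c0 rest0 =>
      have hlen0 : rest0.length ≤ n := by simp at hlen; omega
      rw [pvTokenize.eq_def] at htok
      rw [pvFindLoop.eq_def]
      dsimp only at htok ⊢
      rcases eq_or_ne c0 '%' with rfl | hpc
      · simp only [reduceIte] at htok ⊢
        cases rest0 with
        | nil => rfl
        | cons c1 r1 =>
          cases r1 with
          | nil => rfl
          | cons c2 r =>
            dsimp only at htok ⊢
            cases hr : pvTokenize r with
            | some ts => rw [hr] at htok; simp at htok
            | none =>
              have hrec : ∀ p', pvFindLoop r p' = none :=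
                fun p' => ih r (by simp at hlen0; omega) p' hr
              by_cases hm : p.contains (String.ofList ['%', c1, c2])
              · obtain ⟨p', hp'⟩ := pvPopRidIsSome p _ (List.mem_of_elem_eq_true hm)
                rw [if_pos hm, hp']
                try dsimp only
                rw [hrec]
              · rw [if_neg hm, hrec]
      · rcases eq_or_ne c0 '[' with rfl | hbr
        · rw [if_neg (show ('[' : Char) ≠ '%' by decide)] at htok ⊢
          cases hg : pvGrabBr ['['] rest0 with
          | some tr =>
            obtain ⟨tok, rest'⟩ := tr
            rw [hg] at htok
            dsimp only at htok
            cases hr : pvTokenize rest' with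
            | some ts => rw [hr] at htok; simp at htok
            | none =>
              have hskip : pvSkipBr rest0 = some rest' := by
                rw [← pvSkipGrab rest0 ['['] (by decide), hg]; rfl
              have hlen' : rest'.length ≤ n :=
                le_trans (pvGrabBr_length rest0 ['['] tok rest' hg) hlen0
              rw [hskip]
              exact ih rest' hlen' p hr
          | none =>
            have hskip : pvSkipBr rest0 = none := by
              rw [← pvSkipGrab rest0 ['['] (by decide), hg]; rfl
            rw [hskip]
            rfl
        · rw [if_neg (by simpa using hpc), if_neg (by simpa using hbr)] at htok
          rw [if_neg (by simpa using hpc), if_neg (by simpa using hbr)]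
          cases hr : pvTokenize rest0 with
          | some ts => rw [hr] at htok; simp at htok
          | none =>
            have hrec : ∀ p', pvFindLoop rest0 p' = none :=
              fun p' => ih rest0 hlen0 p' hr
            by_cases hm : p.contains (String.ofList [c0])
            · obtain ⟨p', hp'⟩ := pvPopRidIsSome p _ (List.mem_of_elem_eq_true hm)
              rw [if_pos hm, hp']
              try dsimp only
              rw [hrec]
            · rw [if_neg hm, hrec]

theorem pvFindFilter : ∀ (n : Nat) (cs : List Char), cs.length ≤ n → ∀ (ts p : List String),
    pvTokenize cs = some ts → p.Nodup → (∀ r ∈ p, PySem.Str.startswith r "[" = false) →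
    pvFindLoop cs p = some (p.filter fun r => !(ts.contains r)) := by
  intro n
  induction n with
  | zero =>
    intro cs hlen ts p htok hnd hsw
    cases cs with
    | nil =>
      rw [pvTokenize.eq_def] at htok
      simp only [Option.some.injEq] at htok
      subst htok
      rw [pvFindLoop.eq_def]
      simp
    | cons a b => simp at hlen
  | succ n ih =>
    intro cs hlen ts p htok hnd hsw
    cases cs with
    | nil =>
      rw [pvTokenize.eq_def] at htok
      simp only [Option.some.injEq] at htok
      subst htok
      rw [pvFindLoop.eq_def]
      simp
    | cons c0 rest0 =>
      have hlen0 : rest0.length ≤ n := by simp at hlen; omega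
      rw [pvTokenize.eq_def] at htok
      rw [pvFindLoop.eq_def]
      dsimp only at htok ⊢
      rcases eq_or_ne c0 '%' with rfl | hpc
      · simp only [reduceIte] at htok ⊢
        cases rest0 with
        | nil => simp at htok
        | cons c1 r1 =>
          cases r1 with
          | nil => simp at htok
          | cons c2 r =>
            dsimp only at htok ⊢
            cases hr : pvTokenize r with
            | none => rw [hr] at htok; simp at htok
            | some ts' =>
              rw [hr] at htok
              simp only [Option.some.injEq] at htok
              subst htok
              have hlen' : r.length ≤ n := by simp at hlen0; omega
              have hfs := pvFilterStep p (String.ofList ['%', c1, c2]) ts' hnd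
              by_cases hm : p.contains (String.ofList ['%', c1, c2])
              · rw [if_pos hm] at hfs
                rw [if_pos hm, pvPopRidOfMem p _ hnd (List.mem_of_elem_eq_true hm)]
                try dsimp only
                rw [ih r hlen' ts' _ hr (hnd.erase _)
                  (fun x hx => hsw x (List.mem_of_mem_erase hx)), hfs]
              · rw [if_neg hm] at hfs
                rw [if_neg hm, ih r hlen' ts' p hr hnd hsw, hfs]
      · rcases eq_or_ne c0 '[' with rfl | hord
        · rw [if_neg (show ('[' : Char) ≠ '%' by decide)] at htok ⊢
          cases hg : pvGrabBr ['['] rest0 with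
          | none => rw [hg] at htok; simp at htok
          | some tr =>
            obtain ⟨tok, rest'⟩ := tr
            rw [hg] at htok
            dsimp only at htok
            rw [if_pos (show ('[' : Char) = '[' from rfl)] at htok
            cases hr : pvTokenize rest' with
            | none => rw [hr] at htok; simp at htok
            | some ts' =>
              rw [hr] at htok
              simp only [Option.some.injEq] at htok
              subst htok
              have hskip : pvSkipBr rest0 = some rest' := by
                rw [← pvSkipGrab rest0 ['['] (by decide), hg]; rfl
              have hlen' : rest'.length ≤ n :=
                le_trans (pvGrabBr_length rest0 ['['] tok rest' hg) hlen0
              rw [hskip]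
              try dsimp only
              obtain ⟨tl, htl⟩ := pvGrabPrefix rest0 ['['] tok rest' hg
              have htok' : tok = '[' :: tl := htl.symm
              subst htok'
              have hmf : ¬ p.contains (String.ofList ('[' :: tl)) = true := by
                intro hmem
                have := hsw _ (List.mem_of_elem_eq_true hmem)
                rw [pvSwBracket] at this
                simp at this
              have hfs := pvFilterStep p (String.ofList ('[' :: tl)) ts' hnd
              rw [if_neg hmf] at hfs
              rw [ih rest' hlen' ts' p hr hnd hsw, hfs,
                if_pos (show ('[' : Char) = '[' from rfl)]
        · rw [if_neg (by simpa using hpc), if_neg (by simpa using hord)] at htok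
          rw [if_neg (by simpa using hpc), if_neg (by simpa using hord)]
          cases hr : pvTokenize rest0 with
          | none => rw [hr] at htok; simp at htok
          | some ts' =>
            rw [hr] at htok
            simp only [Option.some.injEq] at htok
            subst htok
            have hfs := pvFilterStep p (String.ofList [c0]) ts' hnd
            by_cases hm : p.contains (String.ofList [c0])
            · rw [if_pos hm] at hfs
              rw [if_pos hm, pvPopRidOfMem p _ hnd (List.mem_of_elem_eq_true hm)]
              try dsimp only
              rw [ih rest0 hlen0 ts' _ hr (hnd.erase _)
                (fun x hx => hsw x (List.mem_of_mem_erase hx)), hfs]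
            · rw [if_neg hm] at hfs
              rw [if_neg hm, ih rest0 hlen0 ts' p hr hnd hsw, hfs]

theorem pvValuesErase {κ ν : Type} [BEq κ] (d : PySem.Dict κ ν) (k : κ) (x : ν)
    (h : x ∈ (d.erase k).values) : x ∈ d.values := by
  simp only [PySem.Dict.erase, PySem.Dict.values] at h ⊢
  obtain ⟨pr, hpr, rfl⟩ := List.mem_map.mp h
  exact List.mem_map.mpr ⟨pr, List.mem_of_mem_filter hpr, rfl⟩

theorem pvAppendFlat (o' : List String) (x : String) (hx : PySem.Str.startswith x "[" = false) :
    (o' ++ [x]).flatMap pvExpand = o'.flatMap pvExpand ++ [x] := by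
  rw [List.flatMap_append]
  simp [pvExpandSingle x hx]

theorem pvPopValue (m : PySem.Dict String String) (t cNew : String) (m' : PySem.Dict String String)
    (h : m.pop? t = some (cNew, m')) : cNew ∈ m.values ∧ m' = m.erase t := by
  simp only [PySem.Dict.pop?] at h
  cases hg : m.get? t with
  | none => rw [hg] at h; simp at h
  | some v =>
    rw [hg] at h
    simp only [Option.map_some, Option.some.injEq, Prod.mk.injEq] at h
    obtain ⟨h1, h2⟩ := h
    constructor
    · rw [← h1]
      exact List.mem_map.mpr ⟨(t, v), PySem.Dict.mem_items_of_get?_eq_some m hg, rfl⟩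
    · exact h2.symm

theorem pvStepEq (t : String) (o' : List String) (m : PySem.Dict String String)
    (s : PySem.Dict String Int) (p : List String)
    (ht : PySem.Str.startswith t "[" = false)
    (hp : ∀ x ∈ p, PySem.Str.startswith x "[" = false)
    (hm : ∀ x ∈ m.values, PySem.Str.startswith x "[" = false) :
    pvRingStep t (o'.flatMap pvExpand) m s p
      = (pvStepTok (o', m, s, p) t).map (fun st => (st.1.flatMap pvExpand, st.2)) := by
  unfold pvRingStep pvStepTok
  rw [ht]
  simp only [Bool.false_eq_true, if_false]
  split_ifs with h0 h1 h2 hc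
  · simp [pvAppendFlat o' t ht]
  · simp [pvAppendFlat o' t ht]
  · -- status = 2, close branch (t in mapping)
    cases hpop : m.pop? t with
    | none => rfl
    | some pr =>
      obtain ⟨cNew, m'⟩ := pr
      obtain ⟨hval, rfl⟩ := pvPopValue m t cNew m' hpop
      try dsimp only
      cases hget : s.get? cNew with
      | none => rfl
      | some v =>
        by_cases hv : v = 1
        · simp [hv, pvAppendFlat o' cNew (hm cNew hval)]
        · simp [hv]
  · -- status = 2, open branch
    cases p with
    | nil => rfl
    | cons x xs =>
      rw [PySem.List.pop?_zero_cons]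
      try dsimp only
      cases hget : s.get? x with
      | none => rfl
      | some v =>
        by_cases hv : v = 0
        · simp [hv, pvAppendFlat o' x (hp x (List.mem_cons_self))]
        · simp [hv]
  · simp [pvAppendFlat o' t ht]

theorem pvStepInv (t : String) (o' : List String) (m : PySem.Dict String String)
    (s : PySem.Dict String Int) (p : List String)
    (o2 : List String) (m2 : PySem.Dict String String) (s2 : PySem.Dict String Int) (p2 : List String)
    (h : pvStepTok (o', m, s, p) t = some (o2, m2, s2, p2))
    (hp : ∀ x ∈ p, PySem.Str.startswith x "[" = false)
    (hm : ∀ x ∈ m.values, PySem.Str.startswith x "[" = false) :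
    (∀ x ∈ p2, PySem.Str.startswith x "[" = false) ∧
    (∀ x ∈ m2.values, PySem.Str.startswith x "[" = false) := by
  unfold pvStepTok at h
  dsimp only at h
  split_ifs at h with hbr h0 h1 h2 hc
  · simp only [Option.some.injEq, Prod.mk.injEq] at h
    obtain ⟨-, rfl, -, rfl⟩ := h
    exact ⟨hp, hm⟩
  · simp only [Option.some.injEq, Prod.mk.injEq] at h
    obtain ⟨-, rfl, -, rfl⟩ := h
    exact ⟨hp, hm⟩
  · simp only [Option.some.injEq, Prod.mk.injEq] at h
    obtain ⟨-, rfl, -, rfl⟩ := h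
    exact ⟨hp, hm⟩
  · cases hpop : m.pop? t with
    | none => rw [hpop] at h; simp at h
    | some pr =>
      obtain ⟨cNew, m'⟩ := pr
      obtain ⟨hval, rfl⟩ := pvPopValue m t cNew m' hpop
      rw [hpop] at h
      dsimp only at h
      cases hget : s.get? cNew with
      | none => rw [hget] at h; simp at h
      | some v =>
        rw [hget] at h
        dsimp only at h
        split_ifs at h
        simp only [Option.some.injEq, Prod.mk.injEq] at h
        obtain ⟨-, rfl, -, rfl⟩ := h
        exact ⟨hp, fun x hx => hm x (pvValuesErase m t x hx)⟩
  · cases p with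
    | nil => rw [show PySem.List.pop? ([] : List String) 0 = none from rfl] at h; simp at h
    | cons y ys =>
      rw [PySem.List.pop?_zero_cons] at h
      dsimp only at h
      cases hget : s.get? y with
      | none => rw [hget] at h; simp at h
      | some v =>
        rw [hget] at h
        dsimp only at h
        split_ifs at h
        simp only [Option.some.injEq, Prod.mk.injEq] at h
        obtain ⟨-, rfl, -, rfl⟩ := h
        refine ⟨fun x hx => hp x (List.mem_cons_of_mem y hx), fun x hx => ?_⟩
        rcases PySem.Dict.mem_values_insert m t y x hx with rfl | hx'
        · exact hp x (List.mem_cons_self)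
        · exact hm x hx'
  · simp only [Option.some.injEq, Prod.mk.injEq] at h
    obtain ⟨-, rfl, -, rfl⟩ := h
    exact ⟨hp, hm⟩

theorem pvMainCorr : ∀ (n : Nat) (cs : List Char), cs.length ≤ n → ∀ (ts o' : List String)
    (m : PySem.Dict String String) (s : PySem.Dict String Int) (p : List String),
    pvTokenize cs = some ts →
    (∀ x ∈ p, PySem.Str.startswith x "[" = false) →
    (∀ x ∈ m.values, PySem.Str.startswith x "[" = false) →
    pvMainLoop cs (o'.flatMap pvExpand) m s p
      = (List.foldlM pvStepTok (o', m, s, p) ts).map (fun st => (st.1.flatMap pvExpand, st.2)) := by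
  intro n
  induction n with
  | zero =>
    intro cs hlen ts o' m s p htok hp hm
    cases cs with
    | nil =>
      rw [pvTokenize.eq_def] at htok
      simp only [Option.some.injEq] at htok
      subst htok
      rw [pvMainLoop.eq_def]
      simp
    | cons a b => simp at hlen
  | succ n ih =>
    intro cs hlen ts o' m s p htok hp hm
    cases cs with
    | nil =>
      rw [pvTokenize.eq_def] at htok
      simp only [Option.some.injEq] at htok
      subst htok
      rw [pvMainLoop.eq_def]
      simp
    | cons c0 rest0 =>
      have hlen0 : rest0.length ≤ n := by simp at hlen; omega
      rw [pvTokenize.eq_def] at htok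
      rw [pvMainLoop.eq_def]
      dsimp only at htok ⊢
      rcases eq_or_ne c0 '%' with rfl | hpc
      · simp only [reduceIte] at htok ⊢
        cases rest0 with
        | nil => simp at htok
        | cons c1 r1 =>
          cases r1 with
          | nil => simp at htok
          | cons c2 r =>
            dsimp only at htok ⊢
            cases hr : pvTokenize r with
            | none => rw [hr] at htok; simp at htok
            | some ts' =>
              rw [hr] at htok
              simp only [Option.some.injEq] at htok
              subst htok
              have hlen' : r.length ≤ n := by simp at hlen0; omega
              have htn : PySem.Str.startswith (String.ofList ['%', c1, c2]) "[" = false :=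
                pvSwCons '%' _ (by decide)
              rw [pvStepEq (String.ofList ['%', c1, c2]) o' m s p htn hp hm]
              rw [List.foldlM_cons]
              cases hstep : pvStepTok (o', m, s, p) (String.ofList ['%', c1, c2]) with
              | none => rfl
              | some st1 =>
                obtain ⟨o1, m1, s1, p1⟩ := st1
                obtain ⟨hp1, hm1⟩ := pvStepInv _ o' m s p o1 m1 s1 p1 hstep hp hm
                exact ih r hlen' ts' o1 m1 s1 p1 hr hp1 hm1
      · rcases eq_or_ne c0 '[' with rfl | hord
        · rw [if_neg (show ('[' : Char) ≠ '%' by decide)] at htok ⊢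
          cases hg : pvGrabBr ['['] rest0 with
          | none => rw [hg] at htok; simp at htok
          | some tr =>
            obtain ⟨tok, rest'⟩ := tr
            rw [hg] at htok
            dsimp only at htok
            rw [if_pos (show ('[' : Char) = '[' from rfl)] at htok
            cases hr : pvTokenize rest' with
            | none => rw [hr] at htok; simp at htok
            | some ts' =>
              rw [hr] at htok
              simp only [Option.some.injEq] at htok
              subst htok
              have hlen' : rest'.length ≤ n :=
                le_trans (pvGrabBr_length rest0 ['['] tok rest' hg) hlen0
              obtain ⟨tl, htl⟩ := pvGrabPrefix rest0 ['['] tok rest' hg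
              have htok' : tok = '[' :: tl := htl.symm
              subst htok'
              rw [if_pos (show ('[' : Char) = '[' from rfl)]
              have hbr1 : pvBrAcc ('[' :: rest0) (o'.flatMap pvExpand)
                  = pvBrAcc rest0 (o'.flatMap pvExpand ++ [String.ofList ['[']]) := by
                rw [pvBrAcc]
                rw [if_neg (by decide)]
              have hbc := pvBrCorr rest0 ['['] (o'.flatMap pvExpand) (by decide)
              rw [hg] at hbc
              simp only [List.map_cons, List.map_nil] at hbc
              rw [hbr1, hbc]
              simp only [Option.map_some]
              try dsimp only
              have hout : o'.flatMap pvExpand ++ ('[' :: tl).map (fun c => String.ofList [c])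
                  = (o' ++ [String.ofList ('[' :: tl)]).flatMap pvExpand := by
                rw [List.flatMap_append]
                simp [pvExpandBracket]
              rw [hout]
              have hstepBr : pvStepTok (o', m, s, p) (String.ofList ('[' :: tl))
                  = some (o' ++ [String.ofList ('[' :: tl)], m, s, p) := by
                unfold pvStepTok
                rw [pvSwBracket]
                rfl
              rw [ih rest' hlen' ts' (o' ++ [String.ofList ('[' :: tl)]) m s p hr hp hm,
                List.foldlM_cons, hstepBr]
              rfl
        · rw [if_neg (by simpa using hpc), if_neg (by simpa using hord)] at htok
          rw [if_neg (by simpa using hpc), if_neg (by simpa using hord)]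
          cases hr : pvTokenize rest0 with
          | none => rw [hr] at htok; simp at htok
          | some ts' =>
            rw [hr] at htok
            simp only [Option.some.injEq] at htok
            subst htok
            have htn : PySem.Str.startswith (String.ofList [c0]) "[" = false :=
              pvSwCons c0 [] hord
            rw [pvStepEq (String.ofList [c0]) o' m s p htn hp hm]
            rw [List.foldlM_cons]
            cases hstep : pvStepTok (o', m, s, p) (String.ofList [c0]) with
            | none => rfl
            | some st1 =>
              obtain ⟨o1, m1, s1, p1⟩ := st1
              obtain ⟨hp1, hm1⟩ := pvStepInv _ o' m s p o1 m1 s1 p1 hstep hp hm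
              exact ih rest0 hlen0 ts' o1 m1 s1 p1 hr hp1 hm1

theorem pvRidsNodup : pvRids.Nodup := by decide

theorem pvRidsNoBracket : ∀ r ∈ pvRids, PySem.Str.startswith r "[" = false := by decide

-- A equals its token-level machine
theorem pvAeqMachine (smiles : String) :
    rearrange_ring_number smiles
      = match pvTokenize smiles.toList with
        | none => ""
        | some ts => pvMachine ts := by
  unfold rearrange_ring_number pvMachine
  cases htok : pvTokenize smiles.toList with
  | none =>
    rw [pvTokNoneFind smiles.toList.length smiles.toList le_rfl pvRids htok]
  | some ts =>
    rw [pvFindFilter smiles.toList.length smiles.toList le_rfl ts pvRids htok pvRidsNodup pvRidsNoBracket]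
    dsimp only
    have hempty : ∀ x ∈ (PySem.Dict.empty : PySem.Dict String String).values,
        PySem.Str.startswith x "[" = false := by
      intro x hx
      simp [PySem.Dict.values, PySem.Dict.empty] at hx
    have hpool : ∀ x ∈ (pvRids.filter fun r => !(ts.contains r)),
        PySem.Str.startswith x "[" = false :=
      fun x hx => pvRidsNoBracket x (List.mem_of_mem_filter hx)
    have hmain := pvMainCorr smiles.toList.length smiles.toList le_rfl ts []
      PySem.Dict.empty pvInitStat _ htok hpool hempty
    rw [List.flatMap_nil] at hmain
    rw [hmain]
    cases hfold : List.foldlM pvStepTok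
        ([], PySem.Dict.empty, pvInitStat, pvRids.filter fun r => !(ts.contains r)) ts with
    | none => rfl
    | some st =>
      obtain ⟨o, m2, s2, p2⟩ := st
      simp only [Option.map_some]
      by_cases hsz : PySem.Dict.size m2 = 0
      · rw [if_pos hsz, if_pos hsz]
        exact pvJoinExpand o
      · rw [if_neg hsz, if_neg hsz]

-- B equals its token-level plan
theorem pvBeqPlan (smiles : String) :
    rearrange_ring_number_alt smiles
      = match pvTokenize smiles.toList with
        | none => ""
        | some ts => pvPlan ts := by
  unfold rearrange_ring_number_alt pvPlan
  cases pvTokenize smiles.toList <;> rfl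

-- ---- small Dict / Bool facts the plan proof needs (erase/pop?/items; not in the PySem book) ----

theorem pvContainsEq (l : List String) (r : String) : l.contains r = decide (r ∈ l) := by
  by_cases hm : r ∈ l
  · rw [decide_eq_true hm]
    exact List.elem_eq_true_of_mem hm
  · rw [decide_eq_false hm]
    cases hc : l.contains r with
    | false => rfl
    | true => exact absurd (List.mem_of_elem_eq_true hc) hm

theorem pvFindFilterNe {ν : Type} (l : List (String × ν)) (k t : String) (h : t ≠ k) :
    (l.filter (fun p => !(p.1 == k))).find? (fun p => p.1 == t) = l.find? (fun p => p.1 == t) := by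
  induction l with
  | nil => rfl
  | cons p l ih =>
    by_cases hk : p.1 = k
    · have h1 : (k == t) = false := beq_eq_false_iff_ne.mpr (Ne.symm h)
      simp [List.filter_cons, hk, h1, ih]
    · have h2 : (p.1 == k) = false := beq_eq_false_iff_ne.mpr hk
      by_cases ht : p.1 = t
      · simp [List.filter_cons, h2, List.find?_cons, ht, h]
      · have h3 : (p.1 == t) = false := beq_eq_false_iff_ne.mpr ht
        simp [List.filter_cons, h2, List.find?_cons, h3, ih]

theorem pvGetEraseNe {ν : Type} (d : PySem.Dict String ν) (k t : String) (h : t ≠ k) :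
    (d.erase k).get? t = d.get? t := by
  simp only [PySem.Dict.erase, PySem.Dict.get?]
  rw [pvFindFilterNe d.items k t h]

theorem pvGetEraseSelf {ν : Type} (d : PySem.Dict String ν) (k : String) :
    (d.erase k).get? k = none := by
  simp only [PySem.Dict.erase, PySem.Dict.get?]
  have : (d.items.filter (fun p => !(p.1 == k))).find? (fun p => p.1 == k) = none := by
    rw [List.find?_eq_none]
    intro p hp
    have := List.of_mem_filter hp
    simpa using this
  rw [this]
  rfl

theorem pvEraseValuesSublist {ν : Type} (d : PySem.Dict String ν) (k : String) :
    (d.erase k).values.Sublist d.values := by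
  simp only [PySem.Dict.erase, PySem.Dict.values]
  exact List.Sublist.map _ List.filter_sublist

theorem pvEraseKeysSublist {ν : Type} (d : PySem.Dict String ν) (k : String) :
    (d.erase k).keys.Sublist d.keys := by
  simp only [PySem.Dict.erase, PySem.Dict.keys]
  exact List.Sublist.map _ List.filter_sublist

theorem pvEraseValuesNe (d : PySem.Dict String String) (t f : String)
    (hvnd : d.values.Nodup) (hget : d.get? t = some f) :
    ∀ w ∈ (d.erase t).values, w ∈ d.values ∧ w ≠ f := by
  intro w hw
  refine ⟨(pvEraseValuesSublist d t).subset hw, ?_⟩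
  rintro rfl
  simp only [PySem.Dict.erase, PySem.Dict.values, List.mem_map] at hw
  obtain ⟨p, hpmem, hp2⟩ := hw
  have hpf := List.of_mem_filter hpmem
  have hpitems := List.mem_of_mem_filter hpmem
  have htf : (t, w) ∈ d.items := PySem.Dict.mem_items_of_get?_eq_some d hget
  have hinj := List.inj_on_of_nodup_map (f := fun x : String × String => x.2)
    (by simpa [PySem.Dict.values] using hvnd) hpitems htf (by simpa using hp2)
  rw [hinj] at hpf
  simp at hpf

theorem pvPopEq {ν : Type} (d : PySem.Dict String ν) (t : String) (f : ν)
    (h : d.get? t = some f) : d.pop? t = some (f, d.erase t) := by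
  simp [PySem.Dict.pop?, h]

theorem pvContainsOfItemsCons {ν : Type} (d : PySem.Dict String ν) (p : String × ν)
    (l : List (String × ν)) (h : d.items = p :: l) : d.contains p.1 = true := by
  simp [PySem.Dict.contains, h]

theorem pvItemsNilOfNoContains {ν : Type} (d : PySem.Dict String ν)
    (h : ∀ t, d.contains t = false) : d.items = [] := by
  cases hd : d.items with
  | nil => rfl
  | cons p l =>
    have := h p.1
    rw [pvContainsOfItemsCons d p l hd] at this
    simp at this

theorem pvValuesGet (d : PySem.Dict String Int) (hknd : d.keys.Nodup) :
    ∀ v ∈ d.values, ∃ t, d.get? t = some v := by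
  intro v hv
  simp only [PySem.Dict.values, List.mem_map] at hv
  obtain ⟨p, hp, rfl⟩ := hv
  exact ⟨p.1, PySem.Dict.get?_of_mem_items d hp hknd⟩

-- ---- Int parity helpers for PySem.Int.mod ----

theorem pvModTwo (k : Int) : PySem.Int.mod k 2 = 0 ∨ PySem.Int.mod k 2 = 1 := by
  have h0 := PySem.Int.mod_nonneg k (show (0:Int) < 2 by norm_num)
  have h1 := PySem.Int.mod_lt k (show (0:Int) < 2 by norm_num)
  omega

theorem pvModSuccOfZero (k : Int) (h : PySem.Int.mod k 2 = 0) : PySem.Int.mod (k+1) 2 = 1 := by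
  have e1 := PySem.Int.floordiv_mul_add_mod k 2
  have e2 := PySem.Int.floordiv_mul_add_mod (k+1) 2
  rcases pvModTwo (k+1) with h2 | h2 <;> omega

theorem pvModSuccOfOne (k : Int) (h : PySem.Int.mod k 2 = 1) : PySem.Int.mod (k+1) 2 = 0 := by
  have e1 := PySem.Int.floordiv_mul_add_mod k 2
  have e2 := PySem.Int.floordiv_mul_add_mod (k+1) 2
  rcases pvModTwo (k+1) with h2 | h2 <;> omega

theorem pvOddGe3 (k : Int) (h2 : 2 ≤ k) (h : PySem.Int.mod k 2 = 1) : 3 ≤ k := by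
  have e1 := PySem.Int.floordiv_mul_add_mod k 2
  omega

-- ---- B's counting pass, characterised recursively ----

def pvOccOf (seen : PySem.Dict String Int) : List String → List (Option Int)
  | [] => []
  | t :: ts =>
    if PySem.Set.contains pvRidSet t then
      some (seen.getD t 0) :: pvOccOf (seen.insert t (seen.getD t 0 + 1)) ts
    else none :: pvOccOf seen ts

def pvSeenOf (seen : PySem.Dict String Int) : List String → PySem.Dict String Int
  | [] => seen
  | t :: ts =>
    if PySem.Set.contains pvRidSet t then
      pvSeenOf (seen.insert t (seen.getD t 0 + 1)) ts
    else pvSeenOf seen ts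

theorem pvCountFold : ∀ (ts : List String) (seen : PySem.Dict String Int) (acc : List (Option Int)),
    ts.foldl pvCountStep (seen, acc) = (pvSeenOf seen ts, acc ++ pvOccOf seen ts) := by
  intro ts
  induction ts with
  | nil => intro seen acc; simp [pvSeenOf, pvOccOf]
  | cons t ts ih =>
    intro seen acc
    by_cases h : PySem.Set.contains pvRidSet t
    · simp only [List.foldl_cons, pvCountStep, h, if_true, pvSeenOf, pvOccOf]
      rw [ih]
      simp
    · simp only [List.foldl_cons, pvCountStep, h, if_false, pvSeenOf, pvOccOf,
        Bool.false_eq_true]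
      rw [ih]
      simp

theorem pvRidSetContains (t : String) : PySem.Set.contains pvRidSet t = decide (t ∈ pvRids) := by
  have h1 : PySem.Set.contains pvRidSet t = decide (t ∈ pvRidSet) :=
    pvContainsEq pvRidSet t
  rw [h1]
  by_cases h : t ∈ pvRids
  · rw [decide_eq_true h, decide_eq_true (show t ∈ pvRidSet from (PySem.Set.mem_ofList pvRids t).mpr h)]
  · rw [decide_eq_false h, decide_eq_false
      (show ¬ t ∈ pvRidSet from fun hh => h ((PySem.Set.mem_ofList pvRids t).mp hh))]

theorem pvOccOf_cons_pos (seen : PySem.Dict String Int) (t : String) (ts : List String)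
    (h : PySem.Set.contains pvRidSet t = true) :
    pvOccOf seen (t :: ts)
      = some (seen.getD t 0) :: pvOccOf (seen.insert t (seen.getD t 0 + 1)) ts := by
  have h0 : pvOccOf seen (t :: ts)
      = if PySem.Set.contains pvRidSet t then
          some (seen.getD t 0) :: pvOccOf (seen.insert t (seen.getD t 0 + 1)) ts
        else none :: pvOccOf seen ts := rfl
  rw [h0, h]
  exact if_pos rfl

theorem pvOccOf_cons_neg (seen : PySem.Dict String Int) (t : String) (ts : List String)
    (h : PySem.Set.contains pvRidSet t = false) :
    pvOccOf seen (t :: ts) = none :: pvOccOf seen ts := by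
  have h0 : pvOccOf seen (t :: ts)
      = if PySem.Set.contains pvRidSet t then
          some (seen.getD t 0) :: pvOccOf (seen.insert t (seen.getD t 0 + 1)) ts
        else none :: pvOccOf seen ts := rfl
  rw [h0, h]
  exact if_neg (by simp)

theorem pvSeenOf_cons_pos (seen : PySem.Dict String Int) (t : String) (ts : List String)
    (h : PySem.Set.contains pvRidSet t = true) :
    pvSeenOf seen (t :: ts) = pvSeenOf (seen.insert t (seen.getD t 0 + 1)) ts := by
  have h0 : pvSeenOf seen (t :: ts)
      = if PySem.Set.contains pvRidSet t then
          pvSeenOf (seen.insert t (seen.getD t 0 + 1)) ts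
        else pvSeenOf seen ts := rfl
  rw [h0, h]
  exact if_pos rfl

theorem pvSeenOf_cons_neg (seen : PySem.Dict String Int) (t : String) (ts : List String)
    (h : PySem.Set.contains pvRidSet t = false) :
    pvSeenOf seen (t :: ts) = pvSeenOf seen ts := by
  have h0 : pvSeenOf seen (t :: ts)
      = if PySem.Set.contains pvRidSet t then
          pvSeenOf (seen.insert t (seen.getD t 0 + 1)) ts
        else pvSeenOf seen ts := rfl
  rw [h0, h]
  exact if_neg (by simp)

theorem pvSeenContains : ∀ (ts : List String) (seen : PySem.Dict String Int) (r : String),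
    (pvSeenOf seen ts).contains r
      = (seen.contains r || (decide (r ∈ pvRids) && decide (r ∈ ts))) := by
  intro ts
  induction ts with
  | nil => intro seen r; simp [pvSeenOf]
  | cons t ts ih =>
    intro seen r
    by_cases ht : t ∈ pvRids
    · rw [pvSeenOf_cons_pos seen t ts (by rw [pvRidSetContains]; exact decide_eq_true ht), ih,
        PySem.Dict.contains_insert]
      by_cases hrt : r = t
      · subst hrt
        simp [ht]
      · have hbeq : (r == t) = false := beq_eq_false_iff_ne.mpr hrt
        simp [hbeq, hrt, List.mem_cons]
    · rw [pvSeenOf_cons_neg seen t ts (by rw [pvRidSetContains]; exact decide_eq_false ht), ih]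
      by_cases hrt : r = t
      · subst hrt
        simp [ht]
      · simp [hrt, List.mem_cons]

theorem pvSeenKeysNodup : ∀ (ts : List String) (seen : PySem.Dict String Int),
    seen.keys.Nodup → (pvSeenOf seen ts).keys.Nodup := by
  intro ts
  induction ts with
  | nil => intro seen h; exact h
  | cons t ts ih =>
    intro seen h
    unfold pvSeenOf
    split
    · exact ih _ (PySem.Dict.nodup_keys_insert seen t _ h)
    · exact ih _ h

theorem pvPoolEq (ts : List String) :
    pvRids.filter (fun r => !((pvSeenOf PySem.Dict.empty ts).contains r))
      = pvRids.filter (fun r => !(ts.contains r)) := by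
  apply List.filter_congr
  intro r hr
  rw [pvSeenContains ts PySem.Dict.empty r, PySem.Dict.contains_empty,
    decide_eq_true hr, pvContainsEq ts r]
  simp

-- ---- the coupling invariant between A's machine state and B's plan state ----

structure PvInv (pool₀ : List String) (seen : PySem.Dict String Int)
    (mapping : PySem.Dict String String) (stat : PySem.Dict String Int)
    (pool : List String) (a : Nat) : Prop where
  hstatNone : ∀ t : String, t ∉ pvRids → stat.get? t = none
  hstatNat : ∀ t ∈ pvRids, t ∉ pool₀ → stat.get? t = some (min (seen.getD t 0) 2)
  hstatPool : ∀ f ∈ pool, stat.get? f = some 0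
  hstatOpen : ∀ f ∈ mapping.values, stat.get? f = some 1
  hdom : ∀ t : String, mapping.contains t
    = (decide (3 ≤ seen.getD t 0) && decide (PySem.Int.mod (seen.getD t 0) 2 = 1))
  hpool : pool = pool₀.drop a
  hvals : ∀ f ∈ mapping.values, f ∈ pool₀.take a
  hvnd : mapping.values.Nodup
  hknd : mapping.keys.Nodup
  hcnt0 : ∀ t ∈ pool₀, seen.getD t 0 = 0
  hnneg : ∀ t : String, 0 ≤ seen.getD t 0

-- INV preservation: occurrence 0 or 1 of a ring token (A: open/close its own id)
theorem pvInvNat (pool₀ : List String) (seen : PySem.Dict String Int)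
    (mapping : PySem.Dict String String) (stat : PySem.Dict String Int)
    (pool : List String) (a : Nat) (t : String)
    (hrid : t ∈ pvRids) (htp : t ∉ pool₀)
    (inv : PvInv pool₀ seen mapping stat pool a)
    (hk : seen.getD t 0 = 0 ∨ seen.getD t 0 = 1) :
    PvInv pool₀ (seen.insert t (seen.getD t 0 + 1)) mapping
      (stat.insert t (seen.getD t 0 + 1)) pool a := by
  have hpoolsub : ∀ f ∈ pool, f ∈ pool₀ := by
    rw [inv.hpool]; exact fun f hf => List.drop_subset _ _ hf
  have hvalsub : ∀ f ∈ mapping.values, f ∈ pool₀ :=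
    fun f hf => List.take_subset _ _ (inv.hvals f hf)
  constructor
  · intro u hu
    rw [PySem.Dict.get?_insert, if_neg (by rintro rfl; exact hu hrid)]
    exact inv.hstatNone u hu
  · intro u hu hup
    rw [PySem.Dict.get?_insert, PySem.Dict.getD_insert]
    by_cases hut : u = t
    · subst hut
      rw [if_pos rfl, if_pos rfl]
      congr 1
      omega
    · rw [if_neg hut, if_neg hut]
      exact inv.hstatNat u hu hup
  · intro f hf
    rw [PySem.Dict.get?_insert, if_neg (by rintro rfl; exact htp (hpoolsub f hf))]
    exact inv.hstatPool f hf
  · intro f hf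
    rw [PySem.Dict.get?_insert, if_neg (by rintro rfl; exact htp (hvalsub f hf))]
    exact inv.hstatOpen f hf
  · intro u
    rw [PySem.Dict.getD_insert]
    by_cases hut : u = t
    · subst hut
      rw [if_pos rfl, inv.hdom u]
      have h1 : ¬ ((3:Int) ≤ seen.getD u 0) := by omega
      have h2 : ¬ ((3:Int) ≤ seen.getD u 0 + 1) := by omega
      rw [decide_eq_false h1, decide_eq_false h2]
      rfl
    · rw [if_neg hut]
      exact inv.hdom u
  · exact inv.hpool
  · exact inv.hvals
  · exact inv.hvnd
  · exact inv.hknd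
  · intro r hr
    rw [PySem.Dict.getD_insert, if_neg (by rintro rfl; exact htp hr)]
    exact inv.hcnt0 r hr
  · intro u
    rw [PySem.Dict.getD_insert]
    split
    · omega
    · exact inv.hnneg u

-- INV preservation: an extra OPENING occurrence takes the pool head
theorem pvInvOpen (pool₀ : List String) (seen : PySem.Dict String Int)
    (mapping : PySem.Dict String String) (stat : PySem.Dict String Int)
    (f : String) (rest : List String) (a : Nat) (t : String)
    (hnd : pool₀.Nodup) (hsub : ∀ r ∈ pool₀, r ∈ pvRids)
    (hrid : t ∈ pvRids) (htp : t ∉ pool₀)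
    (inv : PvInv pool₀ seen mapping stat (f :: rest) a)
    (hk2 : 2 ≤ seen.getD t 0) (hkm : PySem.Int.mod (seen.getD t 0) 2 = 0) :
    PvInv pool₀ (seen.insert t (seen.getD t 0 + 1)) (mapping.insert t f)
      (stat.insert f 1) rest (a + 1) := by
  have hdrop : pool₀.drop a = f :: rest := inv.hpool.symm
  have hfd : f ∈ pool₀.drop a := by rw [hdrop]; exact List.mem_cons_self
  have hfp : f ∈ pool₀ := List.drop_subset _ _ hfd
  have hdisj : List.Disjoint (pool₀.take a) (pool₀.drop a) :=
    List.disjoint_take_drop hnd le_rfl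
  have hfnt : f ∉ pool₀.take a := fun h => hdisj h hfd
  have hga : pool₀[a]? = some f := by rw [← List.head?_drop, hdrop]; rfl
  have htake : pool₀.take (a + 1) = pool₀.take a ++ [f] := by
    rw [List.take_add_one, hga]; rfl
  have hdrop' : rest = pool₀.drop (a + 1) := by
    have h1 := congrArg List.tail hdrop
    rw [List.tail_drop] at h1
    simpa using h1.symm
  have hmapc : mapping.contains t = false := by
    rw [inv.hdom t, hkm]
    simp
  have hpoolnd : (f :: rest).Nodup := by
    rw [← hdrop]; exact hnd.sublist (List.drop_sublist _ _)
  have hfnrest : f ∉ rest := (List.nodup_cons.mp hpoolnd).1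
  have hvalne : ∀ w ∈ mapping.values, w ≠ f := by
    intro w hw h
    subst h
    exact hfnt (inv.hvals w hw)
  constructor
  · intro u hu
    rw [PySem.Dict.get?_insert, if_neg (by rintro rfl; exact hu (hsub u hfp))]
    exact inv.hstatNone u hu
  · intro u hu hup
    rw [PySem.Dict.get?_insert, if_neg (by rintro rfl; exact hup hfp), PySem.Dict.getD_insert]
    by_cases hut : u = t
    · subst hut
      rw [if_pos rfl, inv.hstatNat u hu hup]
      congr 1
      omega
    · rw [if_neg hut]
      exact inv.hstatNat u hu hup
  · intro g hg
    have hgf : g ≠ f := by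
      intro h
      subst h
      exact hfnrest hg
    rw [PySem.Dict.get?_insert, if_neg hgf]
    exact inv.hstatPool g (List.mem_cons_of_mem f hg)
  · intro w hw
    rcases PySem.Dict.mem_values_insert mapping t f w hw with rfl | hw'
    · rw [PySem.Dict.get?_insert, if_pos rfl]
    · rw [PySem.Dict.get?_insert, if_neg (hvalne w hw')]
      exact inv.hstatOpen w hw'
  · intro u
    rw [PySem.Dict.contains_insert, PySem.Dict.getD_insert]
    by_cases hut : u = t
    · subst hut
      rw [if_pos rfl]
      have h3 : (3:Int) ≤ seen.getD u 0 + 1 := by omega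
      have hm1 : PySem.Int.mod (seen.getD u 0 + 1) 2 = 1 := pvModSuccOfZero _ hkm
      rw [decide_eq_true h3, decide_eq_true hm1, beq_self_eq_true]
      rfl
    · rw [if_neg hut, beq_eq_false_iff_ne.mpr hut]
      simp only [Bool.false_or]
      exact inv.hdom u
  · exact hdrop'
  · intro w hw
    rw [htake]
    rcases PySem.Dict.mem_values_insert mapping t f w hw with rfl | hw'
    · exact List.mem_append_right _ List.mem_cons_self
    · exact List.mem_append_left _ (inv.hvals w hw')
  · have hitems : (mapping.insert t f).items = mapping.items ++ [(t, f)] :=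
      PySem.Dict.items_insert_of_not_contains mapping f hmapc
    have hv : (mapping.insert t f).values = mapping.values ++ [f] := by
      simp [PySem.Dict.values, hitems]
    rw [hv]
    simp only [List.nodup_append]
    refine ⟨inv.hvnd, List.nodup_singleton f, ?_⟩
    intro w hw x hx
    rw [List.mem_singleton] at hx
    subst hx
    exact hvalne w hw
  · exact PySem.Dict.nodup_keys_insert mapping t f inv.hknd
  · intro r hr
    rw [PySem.Dict.getD_insert, if_neg (by rintro rfl; exact htp hr)]
    exact inv.hcnt0 r hr
  · intro u
    rw [PySem.Dict.getD_insert]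
    split
    · omega
    · exact inv.hnneg u

-- INV preservation: an extra CLOSING occurrence returns its partner's fresh id
theorem pvInvClose (pool₀ : List String) (seen : PySem.Dict String Int)
    (mapping : PySem.Dict String String) (stat : PySem.Dict String Int)
    (pool : List String) (a : Nat) (t f : String)
    (hnd : pool₀.Nodup) (hsub : ∀ r ∈ pool₀, r ∈ pvRids)
    (hrid : t ∈ pvRids) (htp : t ∉ pool₀)
    (inv : PvInv pool₀ seen mapping stat pool a)
    (hk2 : 2 ≤ seen.getD t 0) (hkm : PySem.Int.mod (seen.getD t 0) 2 = 1)
    (hget : mapping.get? t = some f) :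
    PvInv pool₀ (seen.insert t (seen.getD t 0 + 1)) (mapping.erase t)
      (stat.insert f 2) pool a := by
  have hfv : f ∈ mapping.values := by
    simp only [PySem.Dict.values]
    exact List.mem_map.mpr ⟨(t, f), PySem.Dict.mem_items_of_get?_eq_some mapping hget, rfl⟩
  have hfta : f ∈ pool₀.take a := inv.hvals f hfv
  have hfp : f ∈ pool₀ := List.take_subset _ _ hfta
  have hdisj : List.Disjoint (pool₀.take a) (pool₀.drop a) :=
    List.disjoint_take_drop hnd le_rfl
  have hfndrop : f ∉ pool₀.drop a := fun h => hdisj hfta h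
  have herased := pvEraseValuesNe mapping t f inv.hvnd hget
  constructor
  · intro u hu
    rw [PySem.Dict.get?_insert, if_neg (by rintro rfl; exact hu (hsub u hfp))]
    exact inv.hstatNone u hu
  · intro u hu hup
    rw [PySem.Dict.get?_insert, if_neg (by rintro rfl; exact hup hfp), PySem.Dict.getD_insert]
    by_cases hut : u = t
    · subst hut
      rw [if_pos rfl, inv.hstatNat u hu hup]
      congr 1
      omega
    · rw [if_neg hut]
      exact inv.hstatNat u hu hup
  · intro g hg
    have hgf : g ≠ f := by
      intro h
      subst h
      exact hfndrop (inv.hpool ▸ hg)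
    rw [PySem.Dict.get?_insert, if_neg hgf]
    exact inv.hstatPool g hg
  · intro w hw
    obtain ⟨hwv, hwf⟩ := herased w hw
    rw [PySem.Dict.get?_insert, if_neg hwf]
    exact inv.hstatOpen w hwv
  · intro u
    rw [PySem.Dict.getD_insert, PySem.Dict.contains_eq_isSome_get?]
    by_cases hut : u = t
    · subst hut
      rw [if_pos rfl, pvGetEraseSelf]
      have hm0 : PySem.Int.mod (seen.getD u 0 + 1) 2 = 0 := pvModSuccOfOne _ hkm
      rw [hm0, decide_eq_false (by norm_num : ¬ ((0:Int) = 1)), Bool.and_false]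
      rfl
    · rw [if_neg hut, pvGetEraseNe mapping t u hut, ← PySem.Dict.contains_eq_isSome_get?]
      exact inv.hdom u
  · exact inv.hpool
  · intro w hw
    exact inv.hvals w (herased w hw).1
  · exact inv.hvnd.sublist (pvEraseValuesSublist mapping t)
  · exact inv.hknd.sublist (pvEraseKeysSublist mapping t)
  · intro r hr
    rw [PySem.Dict.getD_insert, if_neg (by rintro rfl; exact htp hr)]
    exact inv.hcnt0 r hr
  · intro u
    rw [PySem.Dict.getD_insert]
    split
    · omega
    · exact inv.hnneg u

-- ---- evaluation of one pvStepTok on a ring token, by status ----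

theorem pvStepTokNat (out : List String) (mapping : PySem.Dict String String)
    (stat : PySem.Dict String Int) (pool : List String) (t : String) (k : Int)
    (hsw : PySem.Str.startswith t "[" = false)
    (hst : stat.getD t (-1) = k) (hk : k = 0 ∨ k = 1) :
    pvStepTok (out, mapping, stat, pool) t = some (out ++ [t], mapping, stat.insert t (k + 1), pool) := by
  unfold pvStepTok
  rw [hsw]
  simp only [Bool.false_eq_true, if_false]
  rw [hst]
  rcases hk with rfl | rfl
  · norm_num
  · norm_num

theorem pvStepTokOpen (out : List String) (mapping : PySem.Dict String String)
    (stat : PySem.Dict String Int) (f : String) (rest : List String) (t : String)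
    (hsw : PySem.Str.startswith t "[" = false)
    (hst : stat.getD t (-1) = 2) (hmap : mapping.contains t = false)
    (hstf : stat.get? f = some 0) :
    pvStepTok (out, mapping, stat, f :: rest) t
      = some (out ++ [f], mapping.insert t f, stat.insert f 1, rest) := by
  unfold pvStepTok
  rw [hsw]
  simp only [Bool.false_eq_true, if_false]
  rw [hst]
  norm_num
  rw [hmap]
  simp only [Bool.false_eq_true, if_false]
  rw [hstf]
  norm_num

theorem pvStepTokOpenFail (out : List String) (mapping : PySem.Dict String String)
    (stat : PySem.Dict String Int) (t : String)
    (hsw : PySem.Str.startswith t "[" = false)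
    (hst : stat.getD t (-1) = 2) (hmap : mapping.contains t = false) :
    pvStepTok (out, mapping, stat, []) t = none := by
  unfold pvStepTok
  rw [hsw]
  simp only [Bool.false_eq_true, if_false]
  rw [hst]
  norm_num
  rw [hmap]
  simp only [Bool.false_eq_true, if_false]
  rfl

theorem pvStepTokClose (out : List String) (mapping : PySem.Dict String String)
    (stat : PySem.Dict String Int) (pool : List String) (t f : String)
    (hsw : PySem.Str.startswith t "[" = false)
    (hst : stat.getD t (-1) = 2) (hmap : mapping.contains t = true)
    (hget : mapping.get? t = some f) (hstf : stat.get? f = some 1) :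
    pvStepTok (out, mapping, stat, pool) t
      = some (out ++ [f], mapping.erase t, stat.insert f 2, pool) := by
  unfold pvStepTok
  rw [hsw]
  simp only [Bool.false_eq_true, if_false]
  rw [hst]
  norm_num
  rw [hmap]
  simp only [if_true]
  rw [pvPopEq mapping t f hget]
  dsimp only
  rw [hstf]
  norm_num

theorem pvStepTokOther (out : List String) (mapping : PySem.Dict String String)
    (stat : PySem.Dict String Int) (pool : List String) (t : String)
    (hsw : PySem.Str.startswith t "[" = false)
    (hst : stat.getD t (-1) = -1) :
    pvStepTok (out, mapping, stat, pool) t = some (out ++ [t], mapping, stat, pool) := by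
  unfold pvStepTok
  rw [hsw]
  simp only [Bool.false_eq_true, if_false]
  rw [hst]
  norm_num

theorem pvStepTokBracket (out : List String) (mapping : PySem.Dict String String)
    (stat : PySem.Dict String Int) (pool : List String) (t : String)
    (hsw : PySem.Str.startswith t "[" = true) :
    pvStepTok (out, mapping, stat, pool) t = some (out ++ [t], mapping, stat, pool) := by
  unfold pvStepTok
  rw [hsw]
  rfl

-- ---- the simulation: A's token machine runs in lockstep with B's plan loop ----

theorem pvSim : ∀ (ts : List String) (seen : PySem.Dict String Int)
    (mapping : PySem.Dict String String) (stat : PySem.Dict String Int)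
    (pool pool₀ : List String) (a : Nat) (out : List String),
    pool₀.Nodup → (∀ r ∈ pool₀, r ∈ pvRids) → (∀ r ∈ pool₀, ¬ r ∈ ts) →
    PvInv pool₀ seen mapping stat pool a →
    ((List.foldlM pvStepTok (out, mapping, stat, pool) ts).map (fun st => (st.1, st.2.1, st.2.2.2))
      = (List.foldlM pvPlanStep (out, pool, mapping) (ts.zip (pvOccOf seen ts))).map
          (fun st => (st.1, st.2.2, st.2.1)))
    ∧ (∀ st, List.foldlM pvStepTok (out, mapping, stat, pool) ts = some st →
        ∀ u : String, st.2.1.contains u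
          = (decide (3 ≤ (pvSeenOf seen ts).getD u 0)
              && decide (PySem.Int.mod ((pvSeenOf seen ts).getD u 0) 2 = 1))) := by
  intro ts
  induction ts with
  | nil =>
    intro seen mapping stat pool pool₀ a out hnd hsub hts inv
    constructor
    · rfl
    · intro st hst u
      simp only [List.foldlM_nil] at hst
      cases hst
      exact inv.hdom u
  | cons t rest ih =>
    intro seen mapping stat pool pool₀ a out hnd hsub hts inv
    have htp : t ∉ pool₀ := fun h => hts t h List.mem_cons_self
    have hts' : ∀ r ∈ pool₀, ¬ r ∈ rest := fun r hr hm => hts r hr (List.mem_cons_of_mem t hm)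
    by_cases hrid : t ∈ pvRids
    · -- ring-id token
      have hsetc : PySem.Set.contains pvRidSet t = true := by
        rw [pvRidSetContains]; exact decide_eq_true hrid
      have hsw : PySem.Str.startswith t "[" = false := pvRidsNoBracket t hrid
      rw [pvOccOf_cons_pos seen t rest hsetc, pvSeenOf_cons_pos seen t rest hsetc,
        List.zip_cons_cons]
      have hk0 : 0 ≤ seen.getD t 0 := inv.hnneg t
      have hstatT : stat.get? t = some (min (seen.getD t 0) 2) := inv.hstatNat t hrid htp
      have hgetD : stat.getD t (-1) = min (seen.getD t 0) 2 :=
        PySem.Dict.getD_of_get?_eq_some stat (-1) hstatT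
      by_cases hklt : seen.getD t 0 < 2
      · -- occurrence 0 or 1: both just append the token
        have hk01 : seen.getD t 0 = 0 ∨ seen.getD t 0 = 1 := by omega
        have hstA : pvStepTok (out, mapping, stat, pool) t
            = some (out ++ [t], mapping, stat.insert t (seen.getD t 0 + 1), pool) := by
          apply pvStepTokNat out mapping stat pool t (seen.getD t 0) hsw
          · rw [hgetD]; omega
          · exact hk01
        have hstB : pvPlanStep (out, pool, mapping) (t, some (seen.getD t 0))
            = some (out ++ [t], pool, mapping) := by
          simp only [pvPlanStep]
          rw [if_pos hklt]
        have inv' := pvInvNat pool₀ seen mapping stat pool a t hrid htp inv hk01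
        have ihh := ih (seen.insert t (seen.getD t 0 + 1)) mapping
          (stat.insert t (seen.getD t 0 + 1)) pool pool₀ a (out ++ [t]) hnd hsub hts' inv'
        constructor
        · rw [List.foldlM_cons, List.foldlM_cons, hstA, hstB]
          simpa using ihh.1
        · intro st hst u
          rw [List.foldlM_cons, hstA] at hst
          simp only [Option.bind_eq_bind, Option.bind_some] at hst
          exact ihh.2 st hst u
      · -- occurrence ≥ 2
        have hst2 : stat.getD t (-1) = 2 := by rw [hgetD]; omega
        rcases pvModTwo (seen.getD t 0) with hkm | hkm
        · -- even extra occurrence: OPEN with the pool head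
          have hmapc : mapping.contains t = false := by
            rw [inv.hdom t, hkm]; simp
          cases hpoolc : pool with
          | nil =>
            -- pool exhausted: both loops fail
            have hstA : pvStepTok (out, mapping, stat, ([] : List String)) t = none :=
              pvStepTokOpenFail out mapping stat t hsw hst2 hmapc
            have hstB : pvPlanStep (out, ([] : List String), mapping)
                (t, some (seen.getD t 0)) = none := by
              simp only [pvPlanStep]
              rw [if_neg (by omega), if_pos hkm]
              rfl
            constructor
            · rw [List.foldlM_cons, List.foldlM_cons, hstA, hstB]
              rfl
            · intro st hst u
              rw [List.foldlM_cons, hstA] at hst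
              simp at hst
          | cons f restp =>
            have hstf : stat.get? f = some 0 := by
              apply inv.hstatPool
              rw [hpoolc]; exact List.mem_cons_self
            have hstA : pvStepTok (out, mapping, stat, f :: restp) t
                = some (out ++ [f], mapping.insert t f, stat.insert f 1, restp) :=
              pvStepTokOpen out mapping stat f restp t hsw hst2 hmapc hstf
            have hstB : pvPlanStep (out, f :: restp, mapping) (t, some (seen.getD t 0))
                = some (out ++ [f], restp, mapping.insert t f) := by
              simp only [pvPlanStep]
              rw [if_neg (by omega), if_pos hkm, PySem.List.pop?_zero_cons]
            have inv' := pvInvOpen pool₀ seen mapping stat f restp a t hnd hsub hrid htp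
              (hpoolc ▸ inv) (by omega) hkm
            have ihh := ih (seen.insert t (seen.getD t 0 + 1)) (mapping.insert t f)
              (stat.insert f 1) restp pool₀ (a + 1) (out ++ [f]) hnd hsub hts' inv'
            constructor
            · rw [List.foldlM_cons, List.foldlM_cons, hstA, hstB]
              simpa using ihh.1
            · intro st hst u
              rw [List.foldlM_cons, hstA] at hst
              simp only [Option.bind_eq_bind, Option.bind_some] at hst
              exact ihh.2 st hst u
        · -- odd extra occurrence: CLOSE with the remembered fresh id
          have hk3 : 3 ≤ seen.getD t 0 := pvOddGe3 _ (by omega) hkm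
          have hmapc : mapping.contains t = true := by
            rw [inv.hdom t, decide_eq_true hk3, decide_eq_true hkm]
            rfl
          have hgetsome : ∃ f, mapping.get? t = some f := by
            rw [PySem.Dict.contains_eq_isSome_get?] at hmapc
            exact Option.isSome_iff_exists.mp hmapc
          obtain ⟨f, hget⟩ := hgetsome
          have hfv : f ∈ mapping.values := by
            simp only [PySem.Dict.values]
            exact List.mem_map.mpr
              ⟨(t, f), PySem.Dict.mem_items_of_get?_eq_some mapping hget, rfl⟩
          have hstf : stat.get? f = some 1 := inv.hstatOpen f hfv
          have hstA : pvStepTok (out, mapping, stat, pool) t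
              = some (out ++ [f], mapping.erase t, stat.insert f 2, pool) :=
            pvStepTokClose out mapping stat pool t f hsw hst2 hmapc hget hstf
          have hstB : pvPlanStep (out, pool, mapping) (t, some (seen.getD t 0))
              = some (out ++ [f], pool, mapping.erase t) := by
            simp only [pvPlanStep]
            rw [if_neg (by omega), if_neg (by omega), pvPopEq mapping t f hget]
          have inv' := pvInvClose pool₀ seen mapping stat pool a t f hnd hsub hrid htp inv
            (by omega) hkm hget
          have ihh := ih (seen.insert t (seen.getD t 0 + 1)) (mapping.erase t)
            (stat.insert f 2) pool pool₀ a (out ++ [f]) hnd hsub hts' inv'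
          constructor
          · rw [List.foldlM_cons, List.foldlM_cons, hstA, hstB]
            simpa using ihh.1
          · intro st hst u
            rw [List.foldlM_cons, hstA] at hst
            simp only [Option.bind_eq_bind, Option.bind_some] at hst
            exact ihh.2 st hst u
    · -- not a ring id: both append the token unchanged
      have hsetc : PySem.Set.contains pvRidSet t = false := by
        rw [pvRidSetContains]; exact decide_eq_false hrid
      rw [pvOccOf_cons_neg seen t rest hsetc, pvSeenOf_cons_neg seen t rest hsetc,
        List.zip_cons_cons]
      have hstA : pvStepTok (out, mapping, stat, pool) t
          = some (out ++ [t], mapping, stat, pool) := by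
        cases hsw : PySem.Str.startswith t "[" with
        | true => exact pvStepTokBracket out mapping stat pool t hsw
        | false =>
          apply pvStepTokOther out mapping stat pool t hsw
          rw [PySem.Dict.getD_eq_get?_getD, inv.hstatNone t hrid]
          rfl
      have hstB : pvPlanStep (out, pool, mapping) (t, none)
          = some (out ++ [t], pool, mapping) := by
        simp [pvPlanStep]
      have ihh := ih seen mapping stat pool pool₀ a (out ++ [t]) hnd hsub hts' inv
      constructor
      · rw [List.foldlM_cons, List.foldlM_cons, hstA, hstB]
        simpa using ihh.1
      · intro st hst u
        rw [List.foldlM_cons, hstA] at hst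
        simp only [Option.bind_eq_bind, Option.bind_some] at hst
        exact ihh.2 st hst u

-- initial state of pvInitStat, characterised
theorem pvFindConstMap (l : List String) (t : String) :
    (l.map (fun r => (r, (0 : Int)))).find? (fun p => p.1 == t)
      = if l.contains t then some (t, 0) else none := by
  induction l with
  | nil => rfl
  | cons r l ih =>
    by_cases hrt : r = t
    · subst hrt
      simp [List.find?_cons, List.contains_cons]
    · have h1 : (r == t) = false := beq_eq_false_iff_ne.mpr hrt
      have h2 : (t == r) = false := beq_eq_false_iff_ne.mpr (Ne.symm hrt)
      simp only [List.map_cons, List.find?_cons, h1, List.contains_cons, h2,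
        Bool.false_or]
      exact ih

theorem pvInitStatItems : pvInitStat.items = pvRids.map (fun r => (r, (0 : Int))) := by
  decide

theorem pvInitStatGet (t : String) :
    pvInitStat.get? t = if pvRids.contains t then some 0 else none := by
  simp only [PySem.Dict.get?, pvInitStatItems, pvFindConstMap]
  split <;> rfl

theorem pvInvInit (ts : List String) :
    PvInv (pvRids.filter (fun r => !(ts.contains r))) PySem.Dict.empty
      PySem.Dict.empty pvInitStat (pvRids.filter (fun r => !(ts.contains r))) 0 := by
  constructor
  · intro t ht
    rw [pvInitStatGet]
    rw [if_neg]
    intro hc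
    exact ht (List.mem_of_elem_eq_true hc)
  · intro t ht _
    rw [pvInitStatGet, if_pos (List.elem_eq_true_of_mem ht)]
    simp [PySem.Dict.getD_empty]
  · intro f hf
    rw [pvInitStatGet, if_pos (List.elem_eq_true_of_mem (List.mem_of_mem_filter hf))]
  · intro f hf
    simp [PySem.Dict.values, PySem.Dict.empty] at hf
  · intro t
    simp [PySem.Dict.contains_empty, PySem.Dict.getD_empty]
  · simp
  · intro f hf
    simp [PySem.Dict.values, PySem.Dict.empty] at hf
  · simp [PySem.Dict.values, PySem.Dict.empty]
  · simp [PySem.Dict.keys, PySem.Dict.empty]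
  · intro t _
    simp [PySem.Dict.getD_empty]
  · intro t
    simp [PySem.Dict.getD_empty]

-- A's final emptiness check agrees with B's up-front parity check
theorem pvMachineEqPlan (ts : List String) : pvMachine ts = pvPlan ts := by
  unfold pvMachine pvPlan
  rw [pvCountFold ts PySem.Dict.empty []]
  simp only [List.nil_append]
  set seenF := pvSeenOf PySem.Dict.empty ts with hseenF
  have hpe : pvRids.filter (fun r => !(seenF.contains r))
      = pvRids.filter (fun r => !(ts.contains r)) := pvPoolEq ts
  rw [hpe]
  set pool₀ := pvRids.filter (fun r => !(ts.contains r)) with hpool₀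
  have hnd : pool₀.Nodup := pvRidsNodup.filter _
  have hsub : ∀ r ∈ pool₀, r ∈ pvRids := fun r hr => List.mem_of_mem_filter hr
  have hts : ∀ r ∈ pool₀, ¬ r ∈ ts := by
    intro r hr hm
    have h1 := List.of_mem_filter hr
    rw [pvContainsEq ts r, decide_eq_true hm] at h1
    simp at h1
  have hsim := pvSim ts PySem.Dict.empty PySem.Dict.empty pvInitStat pool₀ pool₀ 0 []
    hnd hsub hts (pvInvInit ts)
  have hknd : seenF.keys.Nodup := by
    rw [hseenF]
    apply pvSeenKeysNodup
    simp [PySem.Dict.keys, PySem.Dict.empty]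
  cases hA : List.foldlM pvStepTok ([], PySem.Dict.empty, pvInitStat, pool₀) ts with
  | none =>
    have hB : List.foldlM pvPlanStep ([], pool₀, PySem.Dict.empty)
        (ts.zip (pvOccOf PySem.Dict.empty ts)) = none := by
      have h1 := hsim.1
      rw [hA] at h1
      cases hB' : List.foldlM pvPlanStep ([], pool₀, PySem.Dict.empty)
          (ts.zip (pvOccOf PySem.Dict.empty ts)) with
      | none => rfl
      | some st => rw [hB'] at h1; simp at h1
    rw [hB]
    by_cases hchk : (seenF.values.all
        (fun n => decide (n < 3) || decide (PySem.Int.mod n 2 = 0))) = true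
    · rw [if_pos hchk]
    · rw [if_neg hchk]
  | some st =>
    obtain ⟨oA, mA, sA, pA⟩ := st
    have hdomF := hsim.2 (oA, mA, sA, pA) hA
    have hBig : ∃ stB, List.foldlM pvPlanStep ([], pool₀, PySem.Dict.empty)
        (ts.zip (pvOccOf PySem.Dict.empty ts)) = some stB ∧ stB.1 = oA := by
      have h1 := hsim.1
      rw [hA] at h1
      cases hB' : List.foldlM pvPlanStep ([], pool₀, PySem.Dict.empty)
          (ts.zip (pvOccOf PySem.Dict.empty ts)) with
      | none => rw [hB'] at h1; simp at h1
      | some stB =>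
        rw [hB'] at h1
        simp only [Option.map_some, Option.some.injEq] at h1
        exact ⟨stB, rfl, (congrArg Prod.fst h1).symm⟩
    obtain ⟨stB, hB, hBo⟩ := hBig
    rw [hB]
    by_cases hchk : (seenF.values.all
        (fun n => decide (n < 3) || decide (PySem.Int.mod n 2 = 0))) = true
    · have hnc : ∀ u, mA.contains u = false := by
        intro u
        rw [hdomF u]
        cases hget : seenF.get? u with
        | none =>
          have h0 : seenF.getD u 0 = 0 := by
            rw [PySem.Dict.getD_eq_get?_getD, hget]
            rfl
          rw [h0, decide_eq_false (by omega : ¬ ((3:Int) ≤ 0))]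
          rfl
        | some n =>
          have hn : seenF.getD u 0 = n := by
            rw [PySem.Dict.getD_eq_get?_getD, hget]
            rfl
          have hnv : n ∈ seenF.values := by
            simp only [PySem.Dict.values]
            exact List.mem_map.mpr ⟨(u, n), PySem.Dict.mem_items_of_get?_eq_some seenF hget, rfl⟩
          have hok := List.all_eq_true.mp hchk n hnv
          simp only [Bool.or_eq_true, decide_eq_true_eq] at hok
          rw [hn]
          rcases hok with h | h
          · rw [decide_eq_false (by omega : ¬ ((3:Int) ≤ n))]
            rfl
          · rw [decide_eq_false (show ¬ PySem.Int.mod n 2 = 1 by rw [h]; norm_num),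
              Bool.and_false]
      have hsz : PySem.Dict.size mA = 0 := by
        have h2 := pvItemsNilOfNoContains mA hnc
        simp [PySem.Dict.size, h2]
      rw [if_pos hchk]
      dsimp only
      rw [if_pos hsz, hBo]
    · have hbad : ∃ n ∈ seenF.values, ¬ (n < 3 ∨ PySem.Int.mod n 2 = 0) := by
        by_contra hall
        push_neg at hall
        apply hchk
        rw [List.all_eq_true]
        intro n hn
        have h3 := hall n hn
        simp only [Bool.or_eq_true, decide_eq_true_eq]
        tauto
      obtain ⟨n, hnv, hnbad⟩ := hbad
      push_neg at hnbad
      obtain ⟨u, hu⟩ := pvValuesGet seenF hknd n hnv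
      have hun : seenF.getD u 0 = n := by
        rw [PySem.Dict.getD_eq_get?_getD, hu]
        rfl
      have hmod1 : PySem.Int.mod n 2 = 1 := by
        rcases pvModTwo n with h | h
        · exact absurd h hnbad.2
        · exact h
      have hcu : mA.contains u = true := by
        rw [hdomF u, hun, decide_eq_true (show (3:Int) ≤ n by omega),
          decide_eq_true hmod1]
        rfl
      have hsz : ¬ PySem.Dict.size mA = 0 := by
        intro hsz0
        have hitems : mA.items = [] := List.length_eq_zero_iff.mp hsz0
        have hfalse : mA.contains u = false := by
          simp only [PySem.Dict.contains, hitems, List.any_nil]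
        rw [hfalse] at hcu
        cases hcu
      rw [if_neg hchk]
      dsimp only
      rw [if_neg hsz]

theorem pv_ports_eq (smiles : String) :
    rearrange_ring_number smiles = rearrange_ring_number_alt smiles := by
  rw [pvAeqMachine smiles, pvBeqPlan smiles]
  cases pvTokenize smiles.toList with
  | none => rfl
  | some ts => exact pvMachineEqPlan ts

-- ===== VERDICT (by name: the statement is the Claim_ definition above) =====
theorem rearrange_ring_number_spec : Claim_equal_rearrange_ring_number := by
  intro smiles _ _
  unfold Spec_rearrange_ring_number
  exact pv_ports_eq smiles
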